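-- pv_equiv track=rewrite | github.com/Blacksujit/Silent-Killer-AI-Agent | backend/app/tools/workflow_tools.py | count_tool_switches
-- ===== SOURCE A (Python) =====
-- from typing import Dict, Any, List, Optional, Tuple
--
-- def count_tool_switches(events: List[Dict]) -> int:
--     """Count tool/application switches"""
--     tools = set()
--     switches = 0
--     last_tool = None
--
--     for event in events:
--         tool = event.get("meta", {}).get("app", "")
--         if tool not in tools:
--             tools.add(tool)
--             if last_tool:
--                 switches += 1
--             last_tool = tool
--
--     return switches
-- ===== SOURCE B (Python) =====
-- def count_tool_switches(events):
--     """Count tool/application switches"""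
--     # Pass 1: collect distinct tools in first-appearance order.
--     seen = set()
--     distinct = []
--     for event in events:
--         tool = event.get("meta", {}).get("app", "")
--         if tool not in seen:
--             seen.add(tool)
--             distinct.append(tool)
--     # Pass 2: each distinct tool after a truthy predecessor is one switch.
--     return sum(1 for t in distinct[:-1] if t)
-- ===== Notes on version B (the rewrite author's own statement) =====
-- stated objective: simpler
-- what changed: Separates the work into two passes: first build the ordered list of distinct tool names, then count the truthy entries among all but the last, instead of one loop threading a switches counter and a last_tool variable.
import Mathlib
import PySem

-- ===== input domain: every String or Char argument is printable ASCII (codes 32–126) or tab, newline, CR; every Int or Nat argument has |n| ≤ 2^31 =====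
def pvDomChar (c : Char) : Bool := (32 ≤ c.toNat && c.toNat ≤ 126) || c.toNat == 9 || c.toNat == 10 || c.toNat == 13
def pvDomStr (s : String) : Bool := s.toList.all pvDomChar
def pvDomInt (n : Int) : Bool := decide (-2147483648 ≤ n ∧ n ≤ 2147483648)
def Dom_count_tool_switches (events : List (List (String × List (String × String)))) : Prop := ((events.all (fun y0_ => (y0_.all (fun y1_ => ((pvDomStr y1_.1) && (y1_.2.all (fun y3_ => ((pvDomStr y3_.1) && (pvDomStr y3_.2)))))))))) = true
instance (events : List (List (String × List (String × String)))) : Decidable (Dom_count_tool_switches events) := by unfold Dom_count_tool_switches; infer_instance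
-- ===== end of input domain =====

-- B splits A's single accumulating loop into two passes: collect the distinct tool names in
-- first-appearance order, then count the truthy ones among all but the last (objective: simpler).


-- ===== PORT A =====
-- event.get("meta", {}).get("app", "")  (shared by both ports: the same value in both Pythons)
def pvToolOf (event : List (String × List (String × String))) : String :=
  (PySem.Dict.mk ((PySem.Dict.mk event).getD "meta" [])).getD "app" ""

-- truthiness of last_tool : Optional[str]  (None and "" are falsy)
def pvTruthyOptStr (o : Option String) : Bool :=
  match o with
  | none => false
  | some s => s ≠ ""

-- loop body of A: state = (tools, switches, last_tool)
def pvStepA (st : PySem.Set String × Int × Option String)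
    (event : List (String × List (String × String))) :
    PySem.Set String × Int × Option String :=
  let tool := pvToolOf event
  if st.1.contains tool then st
  else (PySem.Set.add st.1 tool,
        (if pvTruthyOptStr st.2.2 then st.2.1 + 1 else st.2.1),
        some tool)

def count_tool_switches (events : List (List (String × List (String × String)))) : Int :=
  (events.foldl pvStepA (PySem.Set.empty, 0, none)).2.1

-- ===== PORT B =====
-- loop body of B's first pass: state = (seen, distinct)
def pvStepB (st : PySem.Set String × List String)
    (event : List (String × List (String × String))) :
    PySem.Set String × List String :=
  let tool := pvToolOf event
  if st.1.contains tool then st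
  else (PySem.Set.add st.1 tool, st.2 ++ [tool])

def count_tool_switches_alt (events : List (List (String × List (String × String)))) : Int :=
  let distinct := (events.foldl pvStepB (PySem.Set.empty, [])).2
  ((PySem.List.slice distinct none (some (-1))).countP (fun t => t ≠ "") : Int)

-- ===== PRECONDITION & SPEC =====
def Spec_count_tool_switches (events : List (List (String × List (String × String)))) (out : Int) : Prop := out = count_tool_switches_alt events
instance (events : List (List (String × List (String × String)))) (out : Int) : Decidable (Spec_count_tool_switches events out) := by unfold Spec_count_tool_switches; infer_instance

-- ===== CLAIM (what is proved, stated in full; the proofs are below) =====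
def Claim_equal_count_tool_switches : Prop := ∀ (events : List (List (String × List (String × String)))), Dom_count_tool_switches events → Spec_count_tool_switches events (count_tool_switches events)

-- ===== LEMMAS AND PROOFS =====

-- loop invariant connecting A's (switches, last_tool) with B's distinct list
lemma pv_key (l : List (List (String × List (String × String))))
    (s : PySem.Set String) (d : List String) :
    (l.foldl pvStepA (s, ((d.dropLast.countP (fun t => t ≠ "")) : Int), d.getLast?)).2.1
      = (((l.foldl pvStepB (s, d)).2.dropLast.countP (fun t => t ≠ "")) : Int) := by
  induction l generalizing s d with
  | nil => simp
  | cons ev l ih =>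
    simp only [List.foldl_cons, pvStepA, pvStepB]
    by_cases h : s.contains (pvToolOf ev)
    · simp only [h, if_true]
      exact ih s d
    · simp only [h, Bool.false_eq_true, if_false]
      have hc : (if pvTruthyOptStr d.getLast? = true
                   then (d.dropLast.countP (fun t => t ≠ "") : Int) + 1
                   else (d.dropLast.countP (fun t => t ≠ "") : Int))
          = ((d.countP (fun t => t ≠ "") : Int)) := by
        rcases List.eq_nil_or_concat d with rfl | ⟨d', x, rfl⟩
        · simp [pvTruthyOptStr]
        · simp only [List.concat_eq_append, List.getLast?_concat, List.dropLast_concat]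
          by_cases hx : x = ""
          · simp [pvTruthyOptStr, List.countP_append, hx]
          · simp [pvTruthyOptStr, List.countP_append, hx]
      have hih := ih (PySem.Set.add s (pvToolOf ev)) (d ++ [pvToolOf ev])
      rw [List.dropLast_concat, List.getLast?_concat] at hih
      rw [hc, ← hih]

-- ===== VERDICT (by name: the statement is the Claim_ definition above) =====
theorem count_tool_switches_spec : Claim_equal_count_tool_switches := by
  intro events _
  unfold Spec_count_tool_switches count_tool_switches count_tool_switches_alt
  have := pv_key events PySem.Set.empty []
  simpa [PySem.List.slice_to_neg_one] using this
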